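-- pv_equiv track=rewrite | github.com/nanomechanicsKIMM/my-tools | skills/patent-strategy-report/scripts/score_relevance_weighted.py | _count_terms_in_text
-- ===== SOURCE A (Python) =====
-- def _count_terms_in_text(text: str, terms: list[str], case_insensitive: bool = True) -> int:
--     if not text or not terms:
--         return 0
--     t = text.upper() if case_insensitive else text
--     count = 0
--     for term in terms:
--         if not term:
--             continue
--         needle = term.upper() if case_insensitive else term
--         if needle in t:
--             count += 1
--     return count
-- ===== SOURCE B (Python) =====
-- def _count_terms_in_text(text: str, terms: list[str], case_insensitive: bool = True) -> int:
--     if not text: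
--         return 0
--     hay = text.upper() if case_insensitive else text
--     needles = sorted(term.upper() if case_insensitive else term
--                      for term in terms if term)
--     total = 0
--     prev = None
--     hit = False
--     for n in needles:
--         if n != prev:
--             prev = n
--             hit = n in hay
--         if hit:
--             total += 1
--     return total
-- ===== Notes on version B (the rewrite author's own statement) =====
-- stated objective: alternative
-- what changed: B normalizes and sorts the nonempty needles once, then does a single run-scan over the sorted list carrying the previous needle and its verdict, so equal (duplicate) needles are tested against the text only once, instead of A's independent substring scan per term.
import Mathlib
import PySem

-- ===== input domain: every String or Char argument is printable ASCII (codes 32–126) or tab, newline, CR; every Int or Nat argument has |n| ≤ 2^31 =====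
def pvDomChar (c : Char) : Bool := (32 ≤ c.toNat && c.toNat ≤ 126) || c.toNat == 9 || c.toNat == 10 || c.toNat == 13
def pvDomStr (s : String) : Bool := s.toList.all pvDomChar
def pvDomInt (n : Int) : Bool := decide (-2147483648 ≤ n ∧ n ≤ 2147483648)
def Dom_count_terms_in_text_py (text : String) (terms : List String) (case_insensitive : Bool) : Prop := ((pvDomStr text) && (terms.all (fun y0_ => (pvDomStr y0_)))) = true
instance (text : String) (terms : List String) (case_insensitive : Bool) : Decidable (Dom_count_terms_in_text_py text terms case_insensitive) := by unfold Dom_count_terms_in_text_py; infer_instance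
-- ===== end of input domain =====

-- ===== PORT A =====
-- B differs: it sorts the normalized nonempty needles and counts in one run-scan that reuses the
-- previous needle's verdict for duplicates instead of scanning the text once per term; objective: alternative.
def count_terms_in_text_py (text : String) (terms : List String) (case_insensitive : Bool) : Int :=
  if text = "" ∨ terms = [] then 0
  else
    let t := if case_insensitive then PySem.Str.upper text else text
    terms.foldl (fun count term =>
      if term = "" then count
      else
        let needle := if case_insensitive then PySem.Str.upper term else term
        if PySem.Str.isIn needle t then count + 1 else count) 0

-- ===== PORT B =====
-- the run-scan loop of Source B: state (prev, hit, total); duplicates of the previous needle reuse hit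
def ctRun (hay : String) : List String → Option String → Bool → Int → Int
  | [], _, _, total => total
  | n :: rest, prev, hit, total =>
    if some n ≠ prev then
      let hit' := PySem.Str.isIn n hay
      ctRun hay rest (some n) hit' (if hit' then total + 1 else total)
    else
      ctRun hay rest prev hit (if hit then total + 1 else total)

def count_terms_in_text_py_alt (text : String) (terms : List String) (case_insensitive : Bool) : Int :=
  if text = "" then 0
  else
    let hay := if case_insensitive then PySem.Str.upper text else text
    let needles := PySem.List.sorted
      ((terms.filter (fun s => !(s = ""))).map
        (fun term => if case_insensitive then PySem.Str.upper term else term))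
      (fun x => x) false
    ctRun hay needles none false 0

-- ===== PRECONDITION & SPEC =====
def Spec_count_terms_in_text_py (text : String) (terms : List String) (case_insensitive : Bool) (out : Int) : Prop := out = count_terms_in_text_py_alt text terms case_insensitive
instance (text : String) (terms : List String) (case_insensitive : Bool) (out : Int) : Decidable (Spec_count_terms_in_text_py text terms case_insensitive out) := by unfold Spec_count_terms_in_text_py; infer_instance

-- ===== CLAIM (what is proved, stated in full; the proofs are below) =====
def Claim_equal_count_terms_in_text_py : Prop := ∀ (text : String) (terms : List String) (case_insensitive : Bool), Dom_count_terms_in_text_py text terms case_insensitive → Spec_count_terms_in_text_py text terms case_insensitive (count_terms_in_text_py text terms case_insensitive)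

-- ===== LEMMAS AND PROOFS =====

-- A's loop counts the nonempty terms whose normalized needle occurs in t.
theorem A_fold_countP (t : String) (ci : Bool) (terms : List String) :
    (terms.foldl (fun count term =>
      if term = "" then count
      else
        let needle := if ci then PySem.Str.upper term else term
        if PySem.Str.isIn needle t then count + 1 else count) (0 : Int))
    = (((terms.filter (fun s => !(s = ""))).map (fun s => if ci then PySem.Str.upper s else s)).countP
        (fun n => PySem.Str.isIn n t) : Int) := by
  rw [List.countP_map, List.countP_filter]
  rw [show (fun count term =>
      if term = "" then count
      else
        let needle := if ci then PySem.Str.upper term else term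
        if PySem.Str.isIn needle t then count + 1 else count)
      = (fun (count : Int) term =>
        if ((fun n => PySem.Str.isIn n t) ∘ fun s => if ci then PySem.Str.upper s else s) term
            && !(term = "") then count + 1 else count) from ?_]
  · rw [PySem.List.foldl_if_add_one]; simp
  · funext count term
    by_cases h : term = "" <;> simp [h]

-- the run-scan equals countP, given that the carried verdict is correct for the carried needle
theorem ctRun_eq_countP (hay : String) (l : List String) :
    ∀ (prev : Option String) (hit : Bool) (total : Int),
      (∀ s, prev = some s → hit = PySem.Str.isIn s hay) →
      ctRun hay l prev hit total = total + (l.countP (fun n => PySem.Str.isIn n hay) : Int) := by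
  induction l with
  | nil => intro prev hit total _; simp [ctRun]
  | cons n rest ih =>
    intro prev hit total hinv
    rw [show ctRun hay (n :: rest) prev hit total
        = (if some n ≠ prev then
            ctRun hay rest (some n) (PySem.Str.isIn n hay)
              (if PySem.Str.isIn n hay then total + 1 else total)
          else
            ctRun hay rest prev hit (if hit then total + 1 else total)) from rfl]
    by_cases hp : some n = prev
    · rw [if_neg (by simp [hp]),
        ih prev hit _ hinv, List.countP_cons]
      have hhit : hit = PySem.Str.isIn n hay := hinv n hp.symm
      subst hhit
      push_cast
      split_ifs with h <;> ring
    · rw [if_pos hp,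
        ih (some n) _ _ (fun s hs => by cases hs; rfl), List.countP_cons]
      push_cast
      split_ifs with h <;> ring

-- ===== VERDICT (by name: the statement is the Claim_ definition above) =====
theorem count_terms_in_text_py_spec : Claim_equal_count_terms_in_text_py := by
  intro text terms ci _
  unfold Spec_count_terms_in_text_py count_terms_in_text_py count_terms_in_text_py_alt
  by_cases ht : text = ""
  · simp [ht]
  by_cases hterms : terms = []
  · subst hterms
    simp [ht, PySem.List.sorted, ctRun]
  simp only [ht, hterms, or_self, if_false]
  rw [A_fold_countP, ctRun_eq_countP _ _ none false 0 (by intro s hs; cases hs)]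
  rw [(PySem.List.sorted_perm _ _ _).countP_eq]
  simp
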